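-- pv_equiv track=rewrite | github.com/0xKhedr/airline-booking | streamlit_graph-RAG/comparison.py | check_entities_match
-- ===== SOURCE A (Python) =====
-- def check_entities_match(extracted: dict, expected: dict) -> bool:
--     if not extracted or not expected: return False
--
--     for key in ['origin', 'destination', 'flight_number', 'code']:
--         extracted_val = extracted.get(key)
--         expected_val = expected.get(key)
--
--         if extracted_val in [None, 'null', 'NULL', '']: extracted_val = None
--         if expected_val in [None, 'null', 'NULL', '']: expected_val = None
--
--         if extracted_val != expected_val: return False
--
--     return True
-- ===== SOURCE B (Python) =====
-- KEYS = ('origin', 'destination', 'flight_number', 'code')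
-- NULLS = (None, 'null', 'NULL', '')
--
-- def _profile(d):
--     # one pass over the dict: fixed-shape profile of the four relevant fields,
--     # with null-likes normalized to None
--     prof = dict.fromkeys(KEYS)
--     for k, v in d.items():
--         if k in prof:
--             prof[k] = None if v in NULLS else v
--     return prof
--
-- def check_entities_match(extracted: dict, expected: dict) -> bool:
--     if not extracted or not expected:
--         return False
--     return _profile(extracted) == _profile(expected)
-- ===== Notes on version B (the rewrite author's own statement) =====
-- stated objective: alternative
-- what changed: Instead of A's per-key get/normalize/compare loop with early return, B makes a single pass over each dict's items building a fixed four-field normalized profile dict and then compares the two profiles with one dict equality; Pre_ excludes association lists with duplicate keys, which cannot arise from an actual Python dict and on which A's first-match lookup vs B's single-pass overwrite is an accidental model corner.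
import Mathlib
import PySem

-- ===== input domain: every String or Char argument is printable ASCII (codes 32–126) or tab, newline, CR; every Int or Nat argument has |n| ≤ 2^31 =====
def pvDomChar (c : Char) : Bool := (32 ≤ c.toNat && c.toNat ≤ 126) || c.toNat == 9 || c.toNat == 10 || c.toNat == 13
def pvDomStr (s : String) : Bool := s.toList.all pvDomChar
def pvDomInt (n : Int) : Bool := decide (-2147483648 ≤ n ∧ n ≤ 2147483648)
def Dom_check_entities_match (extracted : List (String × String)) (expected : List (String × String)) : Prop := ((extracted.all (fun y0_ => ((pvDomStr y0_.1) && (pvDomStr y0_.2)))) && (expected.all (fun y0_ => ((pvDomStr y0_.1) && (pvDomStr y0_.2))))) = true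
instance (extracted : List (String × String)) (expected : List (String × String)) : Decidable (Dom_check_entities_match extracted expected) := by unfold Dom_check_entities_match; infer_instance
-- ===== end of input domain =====

-- B replaces A's per-key get/normalize/compare loop (four lookups with early return) by one pass
-- over each dict building a fixed four-field normalized profile dict, compared once (objective: alternative).

-- dict.get(key): first-match lookup in the association list
def pvGet (d : List (String × String)) (k : String) : Option String :=
  (d.find? (fun p => p.1 == k)).map (fun p => p.2)

-- ===== PORT A =====
-- A's loop over the four keys, with in-place normalization and early return
def check_entities_match_loop (extracted expected : List (String × String)) : List String → Bool
  | [] => true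
  | k :: ks =>
    let ev := pvGet extracted k
    let xv := pvGet expected k
    let ev := if ev = none ∨ ev = some "null" ∨ ev = some "NULL" ∨ ev = some "" then none else ev
    let xv := if xv = none ∨ xv = some "null" ∨ xv = some "NULL" ∨ xv = some "" then none else xv
    if ev ≠ xv then false else check_entities_match_loop extracted expected ks

def check_entities_match (extracted : List (String × String)) (expected : List (String × String)) : Bool :=
  if extracted = [] ∨ expected = [] then false
  else check_entities_match_loop extracted expected ["origin", "destination", "flight_number", "code"]

-- ===== PORT B =====
-- 'None if v in NULLS else v' for a string value v (None is never equal to a string)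
def pvNormV (v : String) : Option String :=
  if v = "null" ∨ v = "NULL" ∨ v = "" then none else some v

-- dict.fromkeys(KEYS): the four keys, each mapped to None
def pvProfInit : PySem.Dict String (Option String) :=
  PySem.Dict.ofList [("origin", none), ("destination", none), ("flight_number", none), ("code", none)]

-- _profile(d): one pass over d.items(), overwriting the profile at the four relevant keys
def pvProfile (d : List (String × String)) : PySem.Dict String (Option String) :=
  d.foldl (fun prof p => if prof.contains p.1 then prof.insert p.1 (pvNormV p.2) else prof) pvProfInit

def check_entities_match_alt (extracted : List (String × String)) (expected : List (String × String)) : Bool :=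
  if extracted.isEmpty || expected.isEmpty then false
  else decide (pvProfile extracted = pvProfile expected)   -- Python dict ==; key order is fixed by the prefilled profile

-- ===== PRECONDITION & SPEC =====
-- Pre_ excludes association lists with duplicate keys: a Python dict cannot contain them, and on such
-- model-only inputs A's first-match lookup vs B's single-pass overwrite is an accidental corner.
def Pre_check_entities_match (extracted : List (String × String)) (expected : List (String × String)) : Prop :=
  (extracted.map Prod.fst).Nodup ∧ (expected.map Prod.fst).Nodup
instance (extracted : List (String × String)) (expected : List (String × String)) : Decidable (Pre_check_entities_match extracted expected) := by unfold Pre_check_entities_match; infer_instance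

def pvWitness_check_entities_match : (List (String × String)) × (List (String × String)) :=
  ([("origin", "JFK"), ("destination", "LAX")], [("origin", "JFK"), ("destination", "LAX"), ("code", "null")])

def Spec_check_entities_match (extracted : List (String × String)) (expected : List (String × String)) (out : Bool) : Prop := out = check_entities_match_alt extracted expected
instance (extracted : List (String × String)) (expected : List (String × String)) (out : Bool) : Decidable (Spec_check_entities_match extracted expected out) := by unfold Spec_check_entities_match; infer_instance

-- ===== CLAIM (what is proved, stated in full; the proofs are below) =====
def Claim_equal_check_entities_match : Prop := ∀ (extracted : List (String × String)) (expected : List (String × String)), Dom_check_entities_match extracted expected → Pre_check_entities_match extracted expected → Spec_check_entities_match extracted expected (check_entities_match extracted expected)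

-- ===== LEMMAS AND PROOFS =====

-- normalization on the result of dict.get (A's view)
def pvNormOpt (o : Option String) : Option String :=
  if o = none ∨ o = some "null" ∨ o = some "NULL" ∨ o = some "" then none else o

def pvKeys : List String := ["origin", "destination", "flight_number", "code"]

def pvStep (prof : PySem.Dict String (Option String)) (p : String × String) : PySem.Dict String (Option String) :=
  if prof.contains p.1 then prof.insert p.1 (pvNormV p.2) else prof

theorem pvProfile_eq_foldl (d : List (String × String)) :
    pvProfile d = d.foldl pvStep pvProfInit := rfl

theorem keys_step (prof : PySem.Dict String (Option String)) (p : String × String) :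
    (pvStep prof p).keys = prof.keys := by
  unfold pvStep
  split
  · next h =>
    simp only [PySem.Dict.keys, PySem.Dict.items_insert, h, if_true, List.map_map]
    apply List.map_congr_left
    intro q _
    by_cases hq : q.1 == p.1 <;> simp [Function.comp, hq]
    exact (eq_of_beq hq).symm
  · rfl

theorem keys_foldl (d : List (String × String)) (prof : PySem.Dict String (Option String)) :
    (d.foldl pvStep prof).keys = prof.keys := by
  induction d generalizing prof with
  | nil => rfl
  | cons p rest ih => rw [List.foldl_cons, ih, keys_step]

theorem contains_step (prof : PySem.Dict String (Option String)) (p : String × String) (k : String) :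
    (pvStep prof p).contains k = prof.contains k := by
  rw [PySem.Dict.contains_eq_decide_mem_keys, PySem.Dict.contains_eq_decide_mem_keys, keys_step]

theorem get?_foldl (d : List (String × String)) (hnd : (d.map Prod.fst).Nodup)
    (prof : PySem.Dict String (Option String)) (k : String) :
    (d.foldl pvStep prof).get? k =
      match pvGet d k with
      | some v => if prof.contains k then some (pvNormV v) else prof.get? k
      | none => prof.get? k := by
  induction d generalizing prof with
  | nil => rfl
  | cons p rest ih =>
    simp only [List.map_cons, List.nodup_cons] at hnd
    rw [List.foldl_cons, ih hnd.2]
    by_cases hk : p.1 = k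
    · have hget : pvGet (p :: rest) k = some p.2 := by
        simp [pvGet, hk]
      have hrest : pvGet rest k = none := by
        simp only [pvGet, Option.map_eq_none_iff, List.find?_eq_none]
        intro q hq
        simp only [beq_iff_eq]
        intro hq1
        exact hnd.1 (hk ▸ hq1 ▸ List.mem_map_of_mem hq)
      rw [hget, hrest]
      unfold pvStep
      by_cases hc : prof.contains p.1
      · simp only [hk]
        rw [hk] at hc
        simp [hc, hk ▸ PySem.Dict.get?_insert_self prof p.1 (pvNormV p.2)]
      · simp only [hc]
        rw [hk] at hc
        simp [hc]
    · have hget : pvGet (p :: rest) k = pvGet rest k := by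
        simp [pvGet, hk]
      rw [hget]
      have hc : (pvStep prof p).contains k = prof.contains k := contains_step prof p k
      have hg : (pvStep prof p).get? k = prof.get? k := by
        unfold pvStep
        split
        · exact PySem.Dict.get?_insert_of_ne prof (pvNormV p.2) (fun h => hk h.symm)
        · rfl
      cases pvGet rest k <;> simp [hc, hg]

theorem profInit_get? (k : String) (hk : k ∈ pvKeys) : pvProfInit.get? k = some none := by
  fin_cases hk <;> decide

theorem profInit_contains (k : String) (hk : k ∈ pvKeys) : pvProfInit.contains k = true := by
  fin_cases hk <;> decide

theorem keys_profile (d : List (String × String)) : (pvProfile d).keys = pvKeys := by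
  rw [pvProfile_eq_foldl, keys_foldl]; decide

theorem get?_profile (d : List (String × String)) (hnd : (d.map Prod.fst).Nodup)
    (k : String) (hk : k ∈ pvKeys) :
    (pvProfile d).get? k = some (pvNormOpt (pvGet d k)) := by
  rw [pvProfile_eq_foldl, get?_foldl d hnd pvProfInit k]
  cases hv : pvGet d k with
  | none => simp [profInit_get? k hk, pvNormOpt]
  | some v =>
    simp only [profInit_contains k hk, if_true]
    unfold pvNormOpt pvNormV
    by_cases h : v = "null" ∨ v = "NULL" ∨ v = ""
    · rcases h with h | h | h <;> simp [h]
    · push Not at h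
      simp [h.1, h.2.1, h.2.2]

theorem profile_eq_iff (e1 e2 : List (String × String))
    (h1 : (e1.map Prod.fst).Nodup) (h2 : (e2.map Prod.fst).Nodup) :
    pvProfile e1 = pvProfile e2 ↔
      ∀ k ∈ pvKeys, pvNormOpt (pvGet e1 k) = pvNormOpt (pvGet e2 k) := by
  constructor
  · intro h k hk
    have := congrArg (fun d => PySem.Dict.get? d k) h
    simp only [get?_profile e1 h1 k hk, get?_profile e2 h2 k hk, Option.some.injEq] at this
    exact this
  · intro h
    apply PySem.Dict.ext
    rw [PySem.Dict.items_eq_map_keys _ (by rw [keys_profile]; decide) none,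
        PySem.Dict.items_eq_map_keys _ (by rw [keys_profile]; decide) none,
        keys_profile, keys_profile]
    apply List.map_congr_left
    intro k hk
    have g1 := get?_profile e1 h1 k hk
    have g2 := get?_profile e2 h2 k hk
    simp only [PySem.Dict.getD, g1, g2, h k hk]

theorem loop_eq_forall (extracted expected : List (String × String)) (ks : List String) :
    check_entities_match_loop extracted expected ks
      = decide (∀ k ∈ ks, pvNormOpt (pvGet extracted k) = pvNormOpt (pvGet expected k)) := by
  induction ks with
  | nil => simp [check_entities_match_loop]
  | cons k ks ih =>
    simp only [check_entities_match_loop, ih, pvNormOpt]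
    by_cases h : (if pvGet extracted k = none ∨ pvGet extracted k = some "null" ∨ pvGet extracted k = some "NULL" ∨ pvGet extracted k = some "" then none else pvGet extracted k)
        = (if pvGet expected k = none ∨ pvGet expected k = some "null" ∨ pvGet expected k = some "NULL" ∨ pvGet expected k = some "" then none else pvGet expected k)
    · simp [h]
    · simp [h]

-- ===== VERDICT (by name: the statement is the Claim_ definition above) =====
theorem check_entities_match_spec : Claim_equal_check_entities_match := by
  intro extracted expected _ hpre
  unfold Spec_check_entities_match check_entities_match check_entities_match_alt
  rcases extracted with _ | ⟨p, l⟩ <;> rcases expected with _ | ⟨q, m⟩ <;> simp only [List.isEmpty_cons, List.isEmpty_nil] <;> try simp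
  rw [loop_eq_forall]
  have := profile_eq_iff (p :: l) (q :: m) hpre.1 hpre.2
  simp only [pvKeys] at this
  rw [decide_eq_decide.mpr this.symm]
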